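-- pv_equiv track=rewrite | github.com/ifox112/Szyfr_Albertiego | albi.py | encrypting
-- ===== SOURCE A (Python) =====
-- from collections import deque
--
-- def convert(s):
--     new = ""
--     for x in s:
--         new += x
--     return new
--
-- def encrypting(text, key):
--     row = deque([])
--     alf = []
--     j = 97
--     for i in range(26):
--         row.append(chr(j))
--         alf.append(chr(j))
--         j += 1
--     l = -1
--     ctext = []
--     for x in range(len(text)):
--         l += 1
--         for i in range(len(alf)):
--             if text[l] == alf[i]:
--                 row.rotate(-1 * key)
--                 ctext.append(row[i])
--     return convert(ctext)
-- ===== SOURCE B (Python) =====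
-- def encrypting(text, key):
--     out = []
--     r = 0
--     for x in text:
--         if 'a' <= x <= 'z':
--             r += 1
--             out.append(chr(97 + ((ord(x) - 97) + key * r) % 26))
--     return ''.join(out)
-- ===== Notes on version B (the rewrite author's own statement) =====
-- stated objective: faster
-- what changed: Replaces the rotating deque plus a 26-step inner index-search per character by a single pass that keeps only a cumulative match counter and computes each output letter arithmetically mod 26.
import Mathlib
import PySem

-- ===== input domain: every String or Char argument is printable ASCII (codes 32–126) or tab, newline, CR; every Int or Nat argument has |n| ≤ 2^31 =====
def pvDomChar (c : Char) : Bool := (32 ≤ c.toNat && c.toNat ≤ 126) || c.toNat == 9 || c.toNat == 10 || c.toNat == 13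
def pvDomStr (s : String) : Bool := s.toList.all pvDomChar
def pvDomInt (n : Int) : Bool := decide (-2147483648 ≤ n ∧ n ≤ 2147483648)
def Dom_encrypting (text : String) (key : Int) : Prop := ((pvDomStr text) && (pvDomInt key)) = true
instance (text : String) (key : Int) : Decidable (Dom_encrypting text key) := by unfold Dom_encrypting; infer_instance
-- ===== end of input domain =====

-- B replaces A's rotating deque and 26-step inner alphabet search by one pass with a
-- cumulative match counter and a mod-26 formula for each output letter.

-- ===== PORT A =====

-- deque.rotate(-k): rotate LEFT by k (any Int k; no-op on an empty deque)
def pyRotL (d : List Char) (k : Int) : List Char :=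
  if d.length = 0 then d
  else
    let m := (PySem.Int.mod k (d.length : Int)).toNat
    d.drop m ++ d.take m

-- row = deque([]); alf = []; j = 97; for i in range(26): row.append(chr(j)); alf.append(chr(j)); j += 1
def aSetup : List Char × List Char × Int :=
  (PySem.List.pyRange 0 26 1).foldl
    (fun (st : List Char × List Char × Int) _ =>
      (st.1 ++ [Char.ofNat st.2.2.toNat], st.2.1 ++ [Char.ofNat st.2.2.toNat], st.2.2 + 1))
    ([], [], 97)

-- for i in range(len(alf)): if text[l] == alf[i]: row.rotate(-1*key); ctext.append(row[i])
-- (row2[i]: i is in range whenever the comparison matched, so the default is never used)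
def aInner (cs alf : List Char) (key : Int) (l : Int) (st : List Char × List Char) : List Char × List Char :=
  (PySem.List.pyRange 0 (alf.length : Int) 1).foldl
    (fun (st2 : List Char × List Char) i =>
      if PySem.List.pyGet? cs l = PySem.List.pyGet? alf i then
        let row2 := pyRotL st2.1 key
        (row2, st2.2 ++ [PySem.List.pyGetD row2 i 'a'])
      else st2)
    st

-- one iteration of 'for x in range(len(text))': l += 1, then the inner loop
def aOuter (cs alf : List Char) (key : Int) (st : List Char × Int × List Char) :
    List Char × Int × List Char :=
  let l := st.2.1 + 1
  let inner := aInner cs alf key l (st.1, st.2.2)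
  (inner.1, l, inner.2)

def encrypting (text : String) (key : Int) : String :=
  let cs := text.toList
  let fin := (PySem.List.pyRange 0 (cs.length : Int) 1).foldl
    (fun st _ => aOuter cs aSetup.2.1 key st) (aSetup.1, -1, [])
  String.ofList fin.2.2    -- convert(ctext): concatenation of the collected chars

-- ===== PORT B =====
def bStep (key : Int) (st : List Char × Int) (c : Char) : List Char × Int :=
  if 'a' ≤ c ∧ c ≤ 'z' then
    let r := st.2 + 1
    (st.1 ++ [Char.ofNat (97 + (PySem.Int.mod ((c.toNat : Int) - 97 + key * r) 26)).toNat], r)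
  else st

def encrypting_alt (text : String) (key : Int) : String :=
  String.ofList (text.toList.foldl (bStep key) ([], 0)).1

-- ===== PRECONDITION & SPEC =====
def Spec_encrypting (text : String) (key : Int) (out : String) : Prop := out = encrypting_alt text key
instance (text : String) (key : Int) (out : String) : Decidable (Spec_encrypting text key out) := by unfold Spec_encrypting; infer_instance

-- ===== CLAIM (what is proved, stated in full; the proofs are below) =====
def Claim_equal_encrypting : Prop := ∀ (text : String) (key : Int), Dom_encrypting text key → Spec_encrypting text key (encrypting text key)


-- ===== LEMMAS AND PROOFS =====

-- the plain lowercase alphabet (proof-side name for what aSetup builds)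
def alfL : List Char := ['a','b','c','d','e','f','g','h','i','j','k','l','m','n','o','p','q','r','s','t','u','v','w','x','y','z']

-- key reduced to a nonnegative rotation amount
def mkeyN (key : Int) : Nat := (key % 26).toNat

-- the ciphertext letter for the r-th matched plaintext letter c
def sChar (key : Int) (c : Char) (r : Nat) : Char := Char.ofNat (97 + ((c.toNat - 97) + mkeyN key * r) % 26)

def cntLow : List Char → Nat
  | [] => 0
  | c :: cs => (if 97 ≤ c.toNat ∧ c.toNat ≤ 122 then 1 else 0) + cntLow cs

def bOutL (key : Int) : List Char → Nat → List Char
  | [], _ => []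
  | c :: cs, r =>
    if 97 ≤ c.toNat ∧ c.toNat ≤ 122 then sChar key c (r+1) :: bOutL key cs (r+1) else bOutL key cs r

theorem char_of_toNat {c d : Char} (h : c.toNat = d.toNat) : c = d := Char.ext (UInt32.toNat_inj.mp h)

theorem aSetup_eq : aSetup = (alfL, alfL, 123) := by decide

theorem foldl_ignore {σ : Type} (g : σ → σ) : ∀ (l : List Int) (st : σ),
    l.foldl (fun s _ => g s) st = g^[l.length] st := by
  intro l
  induction l with
  | nil => intro st; rfl
  | cons x xs ih =>
    intro st
    rw [List.foldl_cons, List.length_cons, Function.iterate_succ_apply, ih]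

theorem inner_low (cs : List Char) (key : Int) (l : Int) (c : Char) (hl : PySem.List.pyGet? cs l = some c)
  (hlow : 97 ≤ c.toNat ∧ c.toNat ≤ 122) (row acc : List Char) :
  aInner cs alfL key l (row, acc) =
    (pyRotL row key, acc ++ [PySem.List.pyGetD (pyRotL row key) ((c.toNat : Int) - 97) 'a']) := by
  unfold aInner
  rw [show (PySem.List.pyRange 0 ((alfL.length : Nat) : Int) 1) = [0,1,2,3,4,5,6,7,8,9,10,11,12,13,14,15,16,17,18,19,20,21,22,23,24,25] from by decide]
  have g0 : PySem.List.pyGet? alfL (0 : Int) = some 'a' := by decide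
  have g1 : PySem.List.pyGet? alfL (1 : Int) = some 'b' := by decide
  have g2 : PySem.List.pyGet? alfL (2 : Int) = some 'c' := by decide
  have g3 : PySem.List.pyGet? alfL (3 : Int) = some 'd' := by decide
  have g4 : PySem.List.pyGet? alfL (4 : Int) = some 'e' := by decide
  have g5 : PySem.List.pyGet? alfL (5 : Int) = some 'f' := by decide
  have g6 : PySem.List.pyGet? alfL (6 : Int) = some 'g' := by decide
  have g7 : PySem.List.pyGet? alfL (7 : Int) = some 'h' := by decide
  have g8 : PySem.List.pyGet? alfL (8 : Int) = some 'i' := by decide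
  have g9 : PySem.List.pyGet? alfL (9 : Int) = some 'j' := by decide
  have g10 : PySem.List.pyGet? alfL (10 : Int) = some 'k' := by decide
  have g11 : PySem.List.pyGet? alfL (11 : Int) = some 'l' := by decide
  have g12 : PySem.List.pyGet? alfL (12 : Int) = some 'm' := by decide
  have g13 : PySem.List.pyGet? alfL (13 : Int) = some 'n' := by decide
  have g14 : PySem.List.pyGet? alfL (14 : Int) = some 'o' := by decide
  have g15 : PySem.List.pyGet? alfL (15 : Int) = some 'p' := by decide
  have g16 : PySem.List.pyGet? alfL (16 : Int) = some 'q' := by decide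
  have g17 : PySem.List.pyGet? alfL (17 : Int) = some 'r' := by decide
  have g18 : PySem.List.pyGet? alfL (18 : Int) = some 's' := by decide
  have g19 : PySem.List.pyGet? alfL (19 : Int) = some 't' := by decide
  have g20 : PySem.List.pyGet? alfL (20 : Int) = some 'u' := by decide
  have g21 : PySem.List.pyGet? alfL (21 : Int) = some 'v' := by decide
  have g22 : PySem.List.pyGet? alfL (22 : Int) = some 'w' := by decide
  have g23 : PySem.List.pyGet? alfL (23 : Int) = some 'x' := by decide
  have g24 : PySem.List.pyGet? alfL (24 : Int) = some 'y' := by decide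
  have g25 : PySem.List.pyGet? alfL (25 : Int) = some 'z' := by decide
  have h : c.toNat = 97 ∨ c.toNat = 98 ∨ c.toNat = 99 ∨ c.toNat = 100 ∨ c.toNat = 101 ∨ c.toNat = 102 ∨ c.toNat = 103 ∨ c.toNat = 104 ∨ c.toNat = 105 ∨ c.toNat = 106 ∨ c.toNat = 107 ∨ c.toNat = 108 ∨ c.toNat = 109 ∨ c.toNat = 110 ∨ c.toNat = 111 ∨ c.toNat = 112 ∨ c.toNat = 113 ∨ c.toNat = 114 ∨ c.toNat = 115 ∨ c.toNat = 116 ∨ c.toNat = 117 ∨ c.toNat = 118 ∨ c.toNat = 119 ∨ c.toNat = 120 ∨ c.toNat = 121 ∨ c.toNat = 122 := by omega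
  rcases h with h|h|h|h|h|h|h|h|h|h|h|h|h|h|h|h|h|h|h|h|h|h|h|h|h|h
  · obtain rfl : c = 'a' := char_of_toNat (h.trans (by decide))
    simp only [List.foldl_cons, List.foldl_nil, hl, g0, g1, g2, g3, g4, g5, g6, g7, g8, g9, g10, g11, g12, g13, g14, g15, g16, g17, g18, g19, g20, g21, g22, g23, g24, g25, Option.some.injEq, show ('a' = 'b') = False from by decide, show ('a' = 'c') = False from by decide, show ('a' = 'd') = False from by decide, show ('a' = 'e') = False from by decide, show ('a' = 'f') = False from by decide, show ('a' = 'g') = False from by decide, show ('a' = 'h') = False from by decide, show ('a' = 'i') = False from by decide, show ('a' = 'j') = False from by decide, show ('a' = 'k') = False from by decide, show ('a' = 'l') = False from by decide, show ('a' = 'm') = False from by decide, show ('a' = 'n') = False from by decide, show ('a' = 'o') = False from by decide, show ('a' = 'p') = False from by decide, show ('a' = 'q') = False from by decide, show ('a' = 'r') = False from by decide, show ('a' = 's') = False from by decide, show ('a' = 't') = False from by decide, show ('a' = 'u') = False from by decide, show ('a' = 'v') = False from by decide, show ('a' = 'w') = False from by decide, show ('a' = 'x') = False from by decide, show ('a'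 = 'y') = False from by decide, show ('a' = 'z') = False from by decide, if_true, if_false,
      show ((Char.toNat 'a' : Int) - 97) = (0 : Int) from by decide]
  · obtain rfl : c = 'b' := char_of_toNat (h.trans (by decide))
    simp only [List.foldl_cons, List.foldl_nil, hl, g0, g1, g2, g3, g4, g5, g6, g7, g8, g9, g10, g11, g12, g13, g14, g15, g16, g17, g18, g19, g20, g21, g22, g23, g24, g25, Option.some.injEq, show ('b' = 'a') = False from by decide, show ('b' = 'c') = False from by decide, show ('b' = 'd') = False from by decide, show ('b' = 'e') = False from by decide, show ('b' = 'f') = False from by decide, show ('b' = 'g') = False from by decide, show ('b' = 'h') = False from by decide, show ('b' = 'i') = False from by decide, show ('b' = 'j') = False from by decide, show ('b' = 'k') = False from by decide, show ('b' = 'l') = False from by decide, show ('b' = 'm') = False from by decide, show ('b' = 'n') = False from by decide, show ('b' = 'o') = False from by decide, show ('b' = 'p') = False from by decide, show ('b' = 'q') = False from by decide, show ('b' = 'r') = False from by decide, show ('b' = 's') = False from by decide, show ('b' = 't') = False from by decide, show ('b' = 'u') = False from by decide, show ('b' = 'v') = False from by decide, show ('b' = 'w') = False from by decide, show ('b' =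 'x') = False from by decide, show ('b' = 'y') = False from by decide, show ('b' = 'z') = False from by decide, if_true, if_false,
      show ((Char.toNat 'b' : Int) - 97) = (1 : Int) from by decide]
  · obtain rfl : c = 'c' := char_of_toNat (h.trans (by decide))
    simp only [List.foldl_cons, List.foldl_nil, hl, g0, g1, g2, g3, g4, g5, g6, g7, g8, g9, g10, g11, g12, g13, g14, g15, g16, g17, g18, g19, g20, g21, g22, g23, g24, g25, Option.some.injEq, show ('c' = 'a') = False from by decide, show ('c' = 'b') = False from by decide, show ('c' = 'd') = False from by decide, show ('c' = 'e') = False from by decide, show ('c' = 'f') = False from by decide, show ('c' = 'g') = False from by decide, show ('c' = 'h') = False from by decide, show ('c' = 'i') = False from by decide, show ('c' = 'j') = False from by decide, show ('c' = 'k') = False from by decide, show ('c' = 'l') = False from by decide, show ('c' = 'm') = False from by decide, show ('c' = 'n') = False from by decide, show ('c' = 'o') = False from by decide, show ('c' = 'p') = False from by decide, show ('c' = 'q') = False from by decide, show ('c' = 'r') = False from by decide, show ('c' = 's') = False from by decide, show ('c' = 't') = False from by decide, show ('c' = 'u') = False from by decide, show ('c' = 'v') = False from by decide, show ('c' = 'w')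 = False from by decide, show ('c' = 'x') = False from by decide, show ('c' = 'y') = False from by decide, show ('c' = 'z') = False from by decide, if_true, if_false,
      show ((Char.toNat 'c' : Int) - 97) = (2 : Int) from by decide]
  · obtain rfl : c = 'd' := char_of_toNat (h.trans (by decide))
    simp only [List.foldl_cons, List.foldl_nil, hl, g0, g1, g2, g3, g4, g5, g6, g7, g8, g9, g10, g11, g12, g13, g14, g15, g16, g17, g18, g19, g20, g21, g22, g23, g24, g25, Option.some.injEq, show ('d' = 'a') = False from by decide, show ('d' = 'b') = False from by decide, show ('d' = 'c') = False from by decide, show ('d' = 'e') = False from by decide, show ('d' = 'f') = False from by decide, show ('d' = 'g') = False from by decide, show ('d' = 'h') = False from by decide, show ('d' = 'i') = False from by decide, show ('d' = 'j') = False from by decide, show ('d' = 'k') = False from by decide, show ('d' = 'l') = False from by decide, show ('d' = 'm') = False from by decide, show ('d' = 'n') = False from by decide, show ('d' = 'o') = False from by decide, show ('d' = 'p') = False from by decide, show ('d' = 'q') = False from by decide, show ('d' = 'r') = False from by decide, show ('d' = 's') = False from by decide, show ('d' = 't') = False from by decide, show ('d' = 'u') = False from by decide, show ('d' = 'v') =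 False from by decide, show ('d' = 'w') = False from by decide, show ('d' = 'x') = False from by decide, show ('d' = 'y') = False from by decide, show ('d' = 'z') = False from by decide, if_true, if_false,
      show ((Char.toNat 'd' : Int) - 97) = (3 : Int) from by decide]
  · obtain rfl : c = 'e' := char_of_toNat (h.trans (by decide))
    simp only [List.foldl_cons, List.foldl_nil, hl, g0, g1, g2, g3, g4, g5, g6, g7, g8, g9, g10, g11, g12, g13, g14, g15, g16, g17, g18, g19, g20, g21, g22, g23, g24, g25, Option.some.injEq, show ('e' = 'a') = False from by decide, show ('e' = 'b') = False from by decide, show ('e' = 'c') = False from by decide, show ('e' = 'd') = False from by decide, show ('e' = 'f') = False from by decide, show ('e' = 'g') = False from by decide, show ('e' = 'h') = False from by decide, show ('e' = 'i') = False from by decide, show ('e' = 'j') = False from by decide, show ('e' = 'k') = False from by decide, show ('e' = 'l') = False from by decide, show ('e' = 'm') = False from by decide, show ('e' = 'n') = False from by decide, show ('e' = 'o') = False from by decide, show ('e' = 'p') = False from by decide, show ('e' = 'q') = False from by decide, show ('e' = 'r') = False from by decide, show ('e' = 's') = False from by decide, show ('e' = 't') = False from by decide, show ('e' = 'u') = False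 from by decide, show ('e' = 'v') = False from by decide, show ('e' = 'w') = False from by decide, show ('e' = 'x') = False from by decide, show ('e' = 'y') = False from by decide, show ('e' = 'z') = False from by decide, if_true, if_false,
      show ((Char.toNat 'e' : Int) - 97) = (4 : Int) from by decide]
  · obtain rfl : c = 'f' := char_of_toNat (h.trans (by decide))
    simp only [List.foldl_cons, List.foldl_nil, hl, g0, g1, g2, g3, g4, g5, g6, g7, g8, g9, g10, g11, g12, g13, g14, g15, g16, g17, g18, g19, g20, g21, g22, g23, g24, g25, Option.some.injEq, show ('f' = 'a') = False from by decide, show ('f' = 'b') = False from by decide, show ('f' = 'c') = False from by decide, show ('f' = 'd') = False from by decide, show ('f' = 'e') = False from by decide, show ('f' = 'g') = False from by decide, show ('f' = 'h') = False from by decide, show ('f' = 'i') = False from by decide, show ('f' = 'j') = False from by decide, show ('f' = 'k') = False from by decide, show ('f' = 'l') = False from by decide, show ('f' = 'm') = False from by decide, show ('f' = 'n') = False from by decide, show ('f' = 'o') = False from by decide, show ('f' = 'p') = False from by decide, show ('f' = 'q') = False from by decide, show ('f' = 'r') = False from by decide, show ('f' = 's') = False from by decide, show ('f' = 't') = False from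 by decide, show ('f' = 'u') = False from by decide, show ('f' = 'v') = False from by decide, show ('f' = 'w') = False from by decide, show ('f' = 'x') = False from by decide, show ('f' = 'y') = False from by decide, show ('f' = 'z') = False from by decide, if_true, if_false,
      show ((Char.toNat 'f' : Int) - 97) = (5 : Int) from by decide]
  · obtain rfl : c = 'g' := char_of_toNat (h.trans (by decide))
    simp only [List.foldl_cons, List.foldl_nil, hl, g0, g1, g2, g3, g4, g5, g6, g7, g8, g9, g10, g11, g12, g13, g14, g15, g16, g17, g18, g19, g20, g21, g22, g23, g24, g25, Option.some.injEq, show ('g' = 'a') = False from by decide, show ('g' = 'b') = False from by decide, show ('g' = 'c') = False from by decide, show ('g' = 'd') = False from by decide, show ('g' = 'e') = False from by decide, show ('g' = 'f') = False from by decide, show ('g' = 'h') = False from by decide, show ('g' = 'i') = False from by decide, show ('g' = 'j') = False from by decide, show ('g' = 'k') = False from by decide, show ('g' = 'l') = False from by decide, show ('g' = 'm') = False from by decide, show ('g' = 'n') = False from by decide, show ('g' = 'o') = False from by decide, show ('g' = 'p') = False from by decide, show ('g' = 'q') = False from by decide, show ('g' = 'r') = False from by decide, show ('g' = 's') = False from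 by decide, show ('g' = 't') = False from by decide, show ('g' = 'u') = False from by decide, show ('g' = 'v') = False from by decide, show ('g' = 'w') = False from by decide, show ('g' = 'x') = False from by decide, show ('g' = 'y') = False from by decide, show ('g' = 'z') = False from by decide, if_true, if_false,
      show ((Char.toNat 'g' : Int) - 97) = (6 : Int) from by decide]
  · obtain rfl : c = 'h' := char_of_toNat (h.trans (by decide))
    simp only [List.foldl_cons, List.foldl_nil, hl, g0, g1, g2, g3, g4, g5, g6, g7, g8, g9, g10, g11, g12, g13, g14, g15, g16, g17, g18, g19, g20, g21, g22, g23, g24, g25, Option.some.injEq, show ('h' = 'a') = False from by decide, show ('h' = 'b') = False from by decide, show ('h' = 'c') = False from by decide, show ('h' = 'd') = False from by decide, show ('h' = 'e') = False from by decide, show ('h' = 'f') = False from by decide, show ('h' = 'g') = False from by decide, show ('h' = 'i') = False from by decide, show ('h' = 'j') = False from by decide, show ('h' = 'k') = False from by decide, show ('h' = 'l') = False from by decide, show ('h' = 'm') = False from by decide, show ('h' = 'n') = False from by decide, show ('h' = 'o') = False from by decide, show ('h' = 'p') = False from by decide, show ('h' = 'q') = False from by decide, show ('h' = 'r') = False from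 by decide, show ('h' = 's') = False from by decide, show ('h' = 't') = False from by decide, show ('h' = 'u') = False from by decide, show ('h' = 'v') = False from by decide, show ('h' = 'w') = False from by decide, show ('h' = 'x') = False from by decide, show ('h' = 'y') = False from by decide, show ('h' = 'z') = False from by decide, if_true, if_false,
      show ((Char.toNat 'h' : Int) - 97) = (7 : Int) from by decide]
  · obtain rfl : c = 'i' := char_of_toNat (h.trans (by decide))
    simp only [List.foldl_cons, List.foldl_nil, hl, g0, g1, g2, g3, g4, g5, g6, g7, g8, g9, g10, g11, g12, g13, g14, g15, g16, g17, g18, g19, g20, g21, g22, g23, g24, g25, Option.some.injEq, show ('i' = 'a') = False from by decide, show ('i' = 'b') = False from by decide, show ('i' = 'c') = False from by decide, show ('i' = 'd') = False from by decide, show ('i' = 'e') = False from by decide, show ('i' = 'f') = False from by decide, show ('i' = 'g') = False from by decide, show ('i' = 'h') = False from by decide, show ('i' = 'j') = False from by decide, show ('i' = 'k') = False from by decide, show ('i' = 'l') = False from by decide, show ('i' = 'm') = False from by decide, show ('i' = 'n') = False from by decide, show ('i' = 'o') = False from by decide, show ('i' = 'p') = False from by decide, show ('i' = 'q') = False from by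 decide, show ('i' = 'r') = False from by decide, show ('i' = 's') = False from by decide, show ('i' = 't') = False from by decide, show ('i' = 'u') = False from by decide, show ('i' = 'v') = False from by decide, show ('i' = 'w') = False from by decide, show ('i' = 'x') = False from by decide, show ('i' = 'y') = False from by decide, show ('i' = 'z') = False from by decide, if_true, if_false,
      show ((Char.toNat 'i' : Int) - 97) = (8 : Int) from by decide]
  · obtain rfl : c = 'j' := char_of_toNat (h.trans (by decide))
    simp only [List.foldl_cons, List.foldl_nil, hl, g0, g1, g2, g3, g4, g5, g6, g7, g8, g9, g10, g11, g12, g13, g14, g15, g16, g17, g18, g19, g20, g21, g22, g23, g24, g25, Option.some.injEq, show ('j' = 'a') = False from by decide, show ('j' = 'b') = False from by decide, show ('j' = 'c') = False from by decide, show ('j' = 'd') = False from by decide, show ('j' = 'e') = False from by decide, show ('j' = 'f') = False from by decide, show ('j' = 'g') = False from by decide, show ('j' = 'h') = False from by decide, show ('j' = 'i') = False from by decide, show ('j' = 'k') = False from by decide, show ('j' = 'l') = False from by decide, show ('j' = 'm') = False from by decide, show ('j' = 'n') = False from by decide, show ('j' = 'o') = False from by decide, show ('j' = 'p') = False from by decide,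 show ('j' = 'q') = False from by decide, show ('j' = 'r') = False from by decide, show ('j' = 's') = False from by decide, show ('j' = 't') = False from by decide, show ('j' = 'u') = False from by decide, show ('j' = 'v') = False from by decide, show ('j' = 'w') = False from by decide, show ('j' = 'x') = False from by decide, show ('j' = 'y') = False from by decide, show ('j' = 'z') = False from by decide, if_true, if_false,
      show ((Char.toNat 'j' : Int) - 97) = (9 : Int) from by decide]
  · obtain rfl : c = 'k' := char_of_toNat (h.trans (by decide))
    simp only [List.foldl_cons, List.foldl_nil, hl, g0, g1, g2, g3, g4, g5, g6, g7, g8, g9, g10, g11, g12, g13, g14, g15, g16, g17, g18, g19, g20, g21, g22, g23, g24, g25, Option.some.injEq, show ('k' = 'a') = False from by decide, show ('k' = 'b') = False from by decide, show ('k' = 'c') = False from by decide, show ('k' = 'd') = False from by decide, show ('k' = 'e') = False from by decide, show ('k' = 'f') = False from by decide, show ('k' = 'g') = False from by decide, show ('k' = 'h') = False from by decide, show ('k' = 'i') = False from by decide, show ('k' = 'j') = False from by decide, show ('k' = 'l') = False from by decide, show ('k' = 'm') = False from by decide, show ('k' = 'n') = False from by decide, show ('k' = 'o') = False from by decide, show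 ('k' = 'p') = False from by decide, show ('k' = 'q') = False from by decide, show ('k' = 'r') = False from by decide, show ('k' = 's') = False from by decide, show ('k' = 't') = False from by decide, show ('k' = 'u') = False from by decide, show ('k' = 'v') = False from by decide, show ('k' = 'w') = False from by decide, show ('k' = 'x') = False from by decide, show ('k' = 'y') = False from by decide, show ('k' = 'z') = False from by decide, if_true, if_false,
      show ((Char.toNat 'k' : Int) - 97) = (10 : Int) from by decide]
  · obtain rfl : c = 'l' := char_of_toNat (h.trans (by decide))
    simp only [List.foldl_cons, List.foldl_nil, hl, g0, g1, g2, g3, g4, g5, g6, g7, g8, g9, g10, g11, g12, g13, g14, g15, g16, g17, g18, g19, g20, g21, g22, g23, g24, g25, Option.some.injEq, show ('l' = 'a') = False from by decide, show ('l' = 'b') = False from by decide, show ('l' = 'c') = False from by decide, show ('l' = 'd') = False from by decide, show ('l' = 'e') = False from by decide, show ('l' = 'f') = False from by decide, show ('l' = 'g') = False from by decide, show ('l' = 'h') = False from by decide, show ('l' = 'i') = False from by decide, show ('l' = 'j') = False from by decide, show ('l' = 'k') = False from by decide, show ('l' = 'm') = False from by decide, show ('l' = 'n') = False from by decide, show ('l'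 = 'o') = False from by decide, show ('l' = 'p') = False from by decide, show ('l' = 'q') = False from by decide, show ('l' = 'r') = False from by decide, show ('l' = 's') = False from by decide, show ('l' = 't') = False from by decide, show ('l' = 'u') = False from by decide, show ('l' = 'v') = False from by decide, show ('l' = 'w') = False from by decide, show ('l' = 'x') = False from by decide, show ('l' = 'y') = False from by decide, show ('l' = 'z') = False from by decide, if_true, if_false,
      show ((Char.toNat 'l' : Int) - 97) = (11 : Int) from by decide]
  · obtain rfl : c = 'm' := char_of_toNat (h.trans (by decide))
    simp only [List.foldl_cons, List.foldl_nil, hl, g0, g1, g2, g3, g4, g5, g6, g7, g8, g9, g10, g11, g12, g13, g14, g15, g16, g17, g18, g19, g20, g21, g22, g23, g24, g25, Option.some.injEq, show ('m' = 'a') = False from by decide, show ('m' = 'b') = False from by decide, show ('m' = 'c') = False from by decide, show ('m' = 'd') = False from by decide, show ('m' = 'e') = False from by decide, show ('m' = 'f') = False from by decide, show ('m' = 'g') = False from by decide, show ('m' = 'h') = False from by decide, show ('m' = 'i') = False from by decide, show ('m' = 'j') = False from by decide, show ('m' = 'k') = False from by decide, show ('m' = 'l') = False from by decide, show ('m' =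 'n') = False from by decide, show ('m' = 'o') = False from by decide, show ('m' = 'p') = False from by decide, show ('m' = 'q') = False from by decide, show ('m' = 'r') = False from by decide, show ('m' = 's') = False from by decide, show ('m' = 't') = False from by decide, show ('m' = 'u') = False from by decide, show ('m' = 'v') = False from by decide, show ('m' = 'w') = False from by decide, show ('m' = 'x') = False from by decide, show ('m' = 'y') = False from by decide, show ('m' = 'z') = False from by decide, if_true, if_false,
      show ((Char.toNat 'm' : Int) - 97) = (12 : Int) from by decide]
  · obtain rfl : c = 'n' := char_of_toNat (h.trans (by decide))
    simp only [List.foldl_cons, List.foldl_nil, hl, g0, g1, g2, g3, g4, g5, g6, g7, g8, g9, g10, g11, g12, g13, g14, g15, g16, g17, g18, g19, g20, g21, g22, g23, g24, g25, Option.some.injEq, show ('n' = 'a') = False from by decide, show ('n' = 'b') = False from by decide, show ('n' = 'c') = False from by decide, show ('n' = 'd') = False from by decide, show ('n' = 'e') = False from by decide, show ('n' = 'f') = False from by decide, show ('n' = 'g') = False from by decide, show ('n' = 'h') = False from by decide, show ('n' = 'i') = False from by decide, show ('n' = 'j') = False from by decide, show ('n' = 'k') = False from by decide, show ('n' = 'l')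 = False from by decide, show ('n' = 'm') = False from by decide, show ('n' = 'o') = False from by decide, show ('n' = 'p') = False from by decide, show ('n' = 'q') = False from by decide, show ('n' = 'r') = False from by decide, show ('n' = 's') = False from by decide, show ('n' = 't') = False from by decide, show ('n' = 'u') = False from by decide, show ('n' = 'v') = False from by decide, show ('n' = 'w') = False from by decide, show ('n' = 'x') = False from by decide, show ('n' = 'y') = False from by decide, show ('n' = 'z') = False from by decide, if_true, if_false,
      show ((Char.toNat 'n' : Int) - 97) = (13 : Int) from by decide]
  · obtain rfl : c = 'o' := char_of_toNat (h.trans (by decide))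
    simp only [List.foldl_cons, List.foldl_nil, hl, g0, g1, g2, g3, g4, g5, g6, g7, g8, g9, g10, g11, g12, g13, g14, g15, g16, g17, g18, g19, g20, g21, g22, g23, g24, g25, Option.some.injEq, show ('o' = 'a') = False from by decide, show ('o' = 'b') = False from by decide, show ('o' = 'c') = False from by decide, show ('o' = 'd') = False from by decide, show ('o' = 'e') = False from by decide, show ('o' = 'f') = False from by decide, show ('o' = 'g') = False from by decide, show ('o' = 'h') = False from by decide, show ('o' = 'i') = False from by decide, show ('o' = 'j') = False from by decide, show ('o' = 'k') = False from by decide, show ('o' = 'l') = False from by decide, show ('o' = 'm') = False from by decide, show ('o' = 'n') = False from by decide, show ('o' = 'p') = False from by decide, show ('o' = 'q') = False from by decide, show ('o' = 'r') = False from by decide, show ('o' = 's') = False from by decide, show ('o' = 't') = False from by decide, show ('o' = 'u') = False from by decide, show ('o' = 'v') = False from by decide, show ('o' = 'w') = False from by decide, show ('o' = 'x') = False from by decide, show ('o' = 'y') = False from by decide, show ('o' = 'z') = False from by decide, if_true, if_false,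
      show ((Char.toNat 'o' : Int) - 97) = (14 : Int) from by decide]
  · obtain rfl : c = 'p' := char_of_toNat (h.trans (by decide))
    simp only [List.foldl_cons, List.foldl_nil, hl, g0, g1, g2, g3, g4, g5, g6, g7, g8, g9, g10, g11, g12, g13, g14, g15, g16, g17, g18, g19, g20, g21, g22, g23, g24, g25, Option.some.injEq, show ('p' = 'a') = False from by decide, show ('p' = 'b') = False from by decide, show ('p' = 'c') = False from by decide, show ('p' = 'd') = False from by decide, show ('p' = 'e') = False from by decide, show ('p' = 'f') = False from by decide, show ('p' = 'g') = False from by decide, show ('p' = 'h') = False from by decide, show ('p' = 'i') = False from by decide, show ('p' = 'j') = False from by decide, show ('p' = 'k') = False from by decide, show ('p' = 'l') = False from by decide, show ('p' = 'm') = False from by decide, show ('p' = 'n') = False from by decide, show ('p' = 'o') = False from by decide, show ('p' = 'q') = False from by decide, show ('p' = 'r') = False from by decide, show ('p' = 's') = False from by decide, show ('p' = 't') = False from by decide, show ('p' = 'u') = False from by decide, show ('p' = 'v') = False from by decide, show ('p' = 'w') = False from by decide, show ('p' = 'x') = False from by decide, show ('p' = 'y') = False from by decide, show ('p' = 'z')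 = False from by decide, if_true, if_false,
      show ((Char.toNat 'p' : Int) - 97) = (15 : Int) from by decide]
  · obtain rfl : c = 'q' := char_of_toNat (h.trans (by decide))
    simp only [List.foldl_cons, List.foldl_nil, hl, g0, g1, g2, g3, g4, g5, g6, g7, g8, g9, g10, g11, g12, g13, g14, g15, g16, g17, g18, g19, g20, g21, g22, g23, g24, g25, Option.some.injEq, show ('q' = 'a') = False from by decide, show ('q' = 'b') = False from by decide, show ('q' = 'c') = False from by decide, show ('q' = 'd') = False from by decide, show ('q' = 'e') = False from by decide, show ('q' = 'f') = False from by decide, show ('q' = 'g') = False from by decide, show ('q' = 'h') = False from by decide, show ('q' = 'i') = False from by decide, show ('q' = 'j') = False from by decide, show ('q' = 'k') = False from by decide, show ('q' = 'l') = False from by decide, show ('q' = 'm') = False from by decide, show ('q' = 'n') = False from by decide, show ('q' = 'o') = False from by decide, show ('q' = 'p') = False from by decide, show ('q' = 'r') = False from by decide, show ('q' = 's') = False from by decide, show ('q' = 't') = False from by decide, show ('q' = 'u') = False from by decide, show ('q' = 'v') = False from by decide, show ('q' = 'w') = False from by decide, show ('q' = 'x') = False from by decide, show ('q' = 'y') =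 False from by decide, show ('q' = 'z') = False from by decide, if_true, if_false,
      show ((Char.toNat 'q' : Int) - 97) = (16 : Int) from by decide]
  · obtain rfl : c = 'r' := char_of_toNat (h.trans (by decide))
    simp only [List.foldl_cons, List.foldl_nil, hl, g0, g1, g2, g3, g4, g5, g6, g7, g8, g9, g10, g11, g12, g13, g14, g15, g16, g17, g18, g19, g20, g21, g22, g23, g24, g25, Option.some.injEq, show ('r' = 'a') = False from by decide, show ('r' = 'b') = False from by decide, show ('r' = 'c') = False from by decide, show ('r' = 'd') = False from by decide, show ('r' = 'e') = False from by decide, show ('r' = 'f') = False from by decide, show ('r' = 'g') = False from by decide, show ('r' = 'h') = False from by decide, show ('r' = 'i') = False from by decide, show ('r' = 'j') = False from by decide, show ('r' = 'k') = False from by decide, show ('r' = 'l') = False from by decide, show ('r' = 'm') = False from by decide, show ('r' = 'n') = False from by decide, show ('r' = 'o') = False from by decide, show ('r' = 'p') = False from by decide, show ('r' = 'q') = False from by decide, show ('r' = 's') = False from by decide, show ('r' = 't') = False from by decide, show ('r' = 'u') = False from by decide, show ('r' = 'v') = False from by decide, show ('r' = 'w') = False from by decide, show ('r' = 'x') = False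 from by decide, show ('r' = 'y') = False from by decide, show ('r' = 'z') = False from by decide, if_true, if_false,
      show ((Char.toNat 'r' : Int) - 97) = (17 : Int) from by decide]
  · obtain rfl : c = 's' := char_of_toNat (h.trans (by decide))
    simp only [List.foldl_cons, List.foldl_nil, hl, g0, g1, g2, g3, g4, g5, g6, g7, g8, g9, g10, g11, g12, g13, g14, g15, g16, g17, g18, g19, g20, g21, g22, g23, g24, g25, Option.some.injEq, show ('s' = 'a') = False from by decide, show ('s' = 'b') = False from by decide, show ('s' = 'c') = False from by decide, show ('s' = 'd') = False from by decide, show ('s' = 'e') = False from by decide, show ('s' = 'f') = False from by decide, show ('s' = 'g') = False from by decide, show ('s' = 'h') = False from by decide, show ('s' = 'i') = False from by decide, show ('s' = 'j') = False from by decide, show ('s' = 'k') = False from by decide, show ('s' = 'l') = False from by decide, show ('s' = 'm') = False from by decide, show ('s' = 'n') = False from by decide, show ('s' = 'o') = False from by decide, show ('s' = 'p') = False from by decide, show ('s' = 'q') = False from by decide, show ('s' = 'r') = False from by decide, show ('s' = 't') = False from by decide, show ('s' = 'u') = False from by decide, show ('s' = 'v') = False from by decide, show ('s' = 'w') = False from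 by decide, show ('s' = 'x') = False from by decide, show ('s' = 'y') = False from by decide, show ('s' = 'z') = False from by decide, if_true, if_false,
      show ((Char.toNat 's' : Int) - 97) = (18 : Int) from by decide]
  · obtain rfl : c = 't' := char_of_toNat (h.trans (by decide))
    simp only [List.foldl_cons, List.foldl_nil, hl, g0, g1, g2, g3, g4, g5, g6, g7, g8, g9, g10, g11, g12, g13, g14, g15, g16, g17, g18, g19, g20, g21, g22, g23, g24, g25, Option.some.injEq, show ('t' = 'a') = False from by decide, show ('t' = 'b') = False from by decide, show ('t' = 'c') = False from by decide, show ('t' = 'd') = False from by decide, show ('t' = 'e') = False from by decide, show ('t' = 'f') = False from by decide, show ('t' = 'g') = False from by decide, show ('t' = 'h') = False from by decide, show ('t' = 'i') = False from by decide, show ('t' = 'j') = False from by decide, show ('t' = 'k') = False from by decide, show ('t' = 'l') = False from by decide, show ('t' = 'm') = False from by decide, show ('t' = 'n') = False from by decide, show ('t' = 'o') = False from by decide, show ('t' = 'p') = False from by decide, show ('t' = 'q') = False from by decide, show ('t' = 'r') = False from by decide, show ('t' = 's') = False from by decide, show ('t' = 'u') = False from by decide, show ('t' = 'v') = False from by decide,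 show ('t' = 'w') = False from by decide, show ('t' = 'x') = False from by decide, show ('t' = 'y') = False from by decide, show ('t' = 'z') = False from by decide, if_true, if_false,
      show ((Char.toNat 't' : Int) - 97) = (19 : Int) from by decide]
  · obtain rfl : c = 'u' := char_of_toNat (h.trans (by decide))
    simp only [List.foldl_cons, List.foldl_nil, hl, g0, g1, g2, g3, g4, g5, g6, g7, g8, g9, g10, g11, g12, g13, g14, g15, g16, g17, g18, g19, g20, g21, g22, g23, g24, g25, Option.some.injEq, show ('u' = 'a') = False from by decide, show ('u' = 'b') = False from by decide, show ('u' = 'c') = False from by decide, show ('u' = 'd') = False from by decide, show ('u' = 'e') = False from by decide, show ('u' = 'f') = False from by decide, show ('u' = 'g') = False from by decide, show ('u' = 'h') = False from by decide, show ('u' = 'i') = False from by decide, show ('u' = 'j') = False from by decide, show ('u' = 'k') = False from by decide, show ('u' = 'l') = False from by decide, show ('u' = 'm') = False from by decide, show ('u' = 'n') = False from by decide, show ('u' = 'o') = False from by decide, show ('u' = 'p') = False from by decide, show ('u' = 'q') = False from by decide, show ('u' = 'r') = False from by decide, show ('u' = 's') = False from by decide, show ('u' = 't') = False from by decide, show ('u'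 = 'v') = False from by decide, show ('u' = 'w') = False from by decide, show ('u' = 'x') = False from by decide, show ('u' = 'y') = False from by decide, show ('u' = 'z') = False from by decide, if_true, if_false,
      show ((Char.toNat 'u' : Int) - 97) = (20 : Int) from by decide]
  · obtain rfl : c = 'v' := char_of_toNat (h.trans (by decide))
    simp only [List.foldl_cons, List.foldl_nil, hl, g0, g1, g2, g3, g4, g5, g6, g7, g8, g9, g10, g11, g12, g13, g14, g15, g16, g17, g18, g19, g20, g21, g22, g23, g24, g25, Option.some.injEq, show ('v' = 'a') = False from by decide, show ('v' = 'b') = False from by decide, show ('v' = 'c') = False from by decide, show ('v' = 'd') = False from by decide, show ('v' = 'e') = False from by decide, show ('v' = 'f') = False from by decide, show ('v' = 'g') = False from by decide, show ('v' = 'h') = False from by decide, show ('v' = 'i') = False from by decide, show ('v' = 'j') = False from by decide, show ('v' = 'k') = False from by decide, show ('v' = 'l') = False from by decide, show ('v' = 'm') = False from by decide, show ('v' = 'n') = False from by decide, show ('v' = 'o') = False from by decide, show ('v' = 'p') = False from by decide, show ('v' = 'q') = False from by decide, show ('v' = 'r') = False from by decide, show ('v' = 's') = False from by decide, show ('v'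 = 't') = False from by decide, show ('v' = 'u') = False from by decide, show ('v' = 'w') = False from by decide, show ('v' = 'x') = False from by decide, show ('v' = 'y') = False from by decide, show ('v' = 'z') = False from by decide, if_true, if_false,
      show ((Char.toNat 'v' : Int) - 97) = (21 : Int) from by decide]
  · obtain rfl : c = 'w' := char_of_toNat (h.trans (by decide))
    simp only [List.foldl_cons, List.foldl_nil, hl, g0, g1, g2, g3, g4, g5, g6, g7, g8, g9, g10, g11, g12, g13, g14, g15, g16, g17, g18, g19, g20, g21, g22, g23, g24, g25, Option.some.injEq, show ('w' = 'a') = False from by decide, show ('w' = 'b') = False from by decide, show ('w' = 'c') = False from by decide, show ('w' = 'd') = False from by decide, show ('w' = 'e') = False from by decide, show ('w' = 'f') = False from by decide, show ('w' = 'g') = False from by decide, show ('w' = 'h') = False from by decide, show ('w' = 'i') = False from by decide, show ('w' = 'j') = False from by decide, show ('w' = 'k') = False from by decide, show ('w' = 'l') = False from by decide, show ('w' = 'm') = False from by decide, show ('w' = 'n') = False from by decide, show ('w' = 'o') = False from by decide, show ('w' = 'p') = False from by decide, show ('w' = 'q') = False from by decide, show ('w' = 'r') = False from by decide, show ('w'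 = 's') = False from by decide, show ('w' = 't') = False from by decide, show ('w' = 'u') = False from by decide, show ('w' = 'v') = False from by decide, show ('w' = 'x') = False from by decide, show ('w' = 'y') = False from by decide, show ('w' = 'z') = False from by decide, if_true, if_false,
      show ((Char.toNat 'w' : Int) - 97) = (22 : Int) from by decide]
  · obtain rfl : c = 'x' := char_of_toNat (h.trans (by decide))
    simp only [List.foldl_cons, List.foldl_nil, hl, g0, g1, g2, g3, g4, g5, g6, g7, g8, g9, g10, g11, g12, g13, g14, g15, g16, g17, g18, g19, g20, g21, g22, g23, g24, g25, Option.some.injEq, show ('x' = 'a') = False from by decide, show ('x' = 'b') = False from by decide, show ('x' = 'c') = False from by decide, show ('x' = 'd') = False from by decide, show ('x' = 'e') = False from by decide, show ('x' = 'f') = False from by decide, show ('x' = 'g') = False from by decide, show ('x' = 'h') = False from by decide, show ('x' = 'i') = False from by decide, show ('x' = 'j') = False from by decide, show ('x' = 'k') = False from by decide, show ('x' = 'l') = False from by decide, show ('x' = 'm') = False from by decide, show ('x' = 'n') = False from by decide, show ('x' = 'o') = False from by decide, show ('x' = 'p') = False from by decide, show ('x' = 'q') = False from by decide, show ('x' =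 'r') = False from by decide, show ('x' = 's') = False from by decide, show ('x' = 't') = False from by decide, show ('x' = 'u') = False from by decide, show ('x' = 'v') = False from by decide, show ('x' = 'w') = False from by decide, show ('x' = 'y') = False from by decide, show ('x' = 'z') = False from by decide, if_true, if_false,
      show ((Char.toNat 'x' : Int) - 97) = (23 : Int) from by decide]
  · obtain rfl : c = 'y' := char_of_toNat (h.trans (by decide))
    simp only [List.foldl_cons, List.foldl_nil, hl, g0, g1, g2, g3, g4, g5, g6, g7, g8, g9, g10, g11, g12, g13, g14, g15, g16, g17, g18, g19, g20, g21, g22, g23, g24, g25, Option.some.injEq, show ('y' = 'a') = False from by decide, show ('y' = 'b') = False from by decide, show ('y' = 'c') = False from by decide, show ('y' = 'd') = False from by decide, show ('y' = 'e') = False from by decide, show ('y' = 'f') = False from by decide, show ('y' = 'g') = False from by decide, show ('y' = 'h') = False from by decide, show ('y' = 'i') = False from by decide, show ('y' = 'j') = False from by decide, show ('y' = 'k') = False from by decide, show ('y' = 'l') = False from by decide, show ('y' = 'm') = False from by decide, show ('y' = 'n') = False from by decide, show ('y' = 'o') = False from by decide, show ('y' = 'p') = False from by decide, show ('y' = 'q')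 = False from by decide, show ('y' = 'r') = False from by decide, show ('y' = 's') = False from by decide, show ('y' = 't') = False from by decide, show ('y' = 'u') = False from by decide, show ('y' = 'v') = False from by decide, show ('y' = 'w') = False from by decide, show ('y' = 'x') = False from by decide, show ('y' = 'z') = False from by decide, if_true, if_false,
      show ((Char.toNat 'y' : Int) - 97) = (24 : Int) from by decide]
  · obtain rfl : c = 'z' := char_of_toNat (h.trans (by decide))
    simp only [List.foldl_cons, List.foldl_nil, hl, g0, g1, g2, g3, g4, g5, g6, g7, g8, g9, g10, g11, g12, g13, g14, g15, g16, g17, g18, g19, g20, g21, g22, g23, g24, g25, Option.some.injEq, show ('z' = 'a') = False from by decide, show ('z' = 'b') = False from by decide, show ('z' = 'c') = False from by decide, show ('z' = 'd') = False from by decide, show ('z' = 'e') = False from by decide, show ('z' = 'f') = False from by decide, show ('z' = 'g') = False from by decide, show ('z' = 'h') = False from by decide, show ('z' = 'i') = False from by decide, show ('z' = 'j') = False from by decide, show ('z' = 'k') = False from by decide, show ('z' = 'l') = False from by decide, show ('z' = 'm') = False from by decide, show ('z' = 'n') = False from by decide, show ('z' = 'o') = False from by decide, show ('z' = 'p') =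 False from by decide, show ('z' = 'q') = False from by decide, show ('z' = 'r') = False from by decide, show ('z' = 's') = False from by decide, show ('z' = 't') = False from by decide, show ('z' = 'u') = False from by decide, show ('z' = 'v') = False from by decide, show ('z' = 'w') = False from by decide, show ('z' = 'x') = False from by decide, show ('z' = 'y') = False from by decide, if_true, if_false,
      show ((Char.toNat 'z' : Int) - 97) = (25 : Int) from by decide]

theorem inner_high (cs : List Char) (key : Int) (l : Int) (c : Char) (hl : PySem.List.pyGet? cs l = some c)
  (hlow : ¬ (97 ≤ c.toNat ∧ c.toNat ≤ 122)) (row acc : List Char) :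
  aInner cs alfL key l (row, acc) = (row, acc) := by
  unfold aInner
  rw [show (PySem.List.pyRange 0 ((alfL.length : Nat) : Int) 1) = [0,1,2,3,4,5,6,7,8,9,10,11,12,13,14,15,16,17,18,19,20,21,22,23,24,25] from by decide]
  have hb : c.toNat < 97 ∨ 122 < c.toNat := by omega
  have g0 : PySem.List.pyGet? alfL (0 : Int) = some 'a' := by decide
  have g1 : PySem.List.pyGet? alfL (1 : Int) = some 'b' := by decide
  have g2 : PySem.List.pyGet? alfL (2 : Int) = some 'c' := by decide
  have g3 : PySem.List.pyGet? alfL (3 : Int) = some 'd' := by decide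
  have g4 : PySem.List.pyGet? alfL (4 : Int) = some 'e' := by decide
  have g5 : PySem.List.pyGet? alfL (5 : Int) = some 'f' := by decide
  have g6 : PySem.List.pyGet? alfL (6 : Int) = some 'g' := by decide
  have g7 : PySem.List.pyGet? alfL (7 : Int) = some 'h' := by decide
  have g8 : PySem.List.pyGet? alfL (8 : Int) = some 'i' := by decide
  have g9 : PySem.List.pyGet? alfL (9 : Int) = some 'j' := by decide
  have g10 : PySem.List.pyGet? alfL (10 : Int) = some 'k' := by decide
  have g11 : PySem.List.pyGet? alfL (11 : Int) = some 'l' := by decide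
  have g12 : PySem.List.pyGet? alfL (12 : Int) = some 'm' := by decide
  have g13 : PySem.List.pyGet? alfL (13 : Int) = some 'n' := by decide
  have g14 : PySem.List.pyGet? alfL (14 : Int) = some 'o' := by decide
  have g15 : PySem.List.pyGet? alfL (15 : Int) = some 'p' := by decide
  have g16 : PySem.List.pyGet? alfL (16 : Int) = some 'q' := by decide
  have g17 : PySem.List.pyGet? alfL (17 : Int) = some 'r' := by decide
  have g18 : PySem.List.pyGet? alfL (18 : Int) = some 's' := by decide
  have g19 : PySem.List.pyGet? alfL (19 : Int) = some 't' := by decide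
  have g20 : PySem.List.pyGet? alfL (20 : Int) = some 'u' := by decide
  have g21 : PySem.List.pyGet? alfL (21 : Int) = some 'v' := by decide
  have g22 : PySem.List.pyGet? alfL (22 : Int) = some 'w' := by decide
  have g23 : PySem.List.pyGet? alfL (23 : Int) = some 'x' := by decide
  have g24 : PySem.List.pyGet? alfL (24 : Int) = some 'y' := by decide
  have g25 : PySem.List.pyGet? alfL (25 : Int) = some 'z' := by decide
  have e0 : (c = 'a') = False := eq_false (fun hh => by subst hh; exact absurd hb (by decide))
  have e1 : (c = 'b') = False := eq_false (fun hh => by subst hh; exact absurd hb (by decide))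
  have e2 : (c = 'c') = False := eq_false (fun hh => by subst hh; exact absurd hb (by decide))
  have e3 : (c = 'd') = False := eq_false (fun hh => by subst hh; exact absurd hb (by decide))
  have e4 : (c = 'e') = False := eq_false (fun hh => by subst hh; exact absurd hb (by decide))
  have e5 : (c = 'f') = False := eq_false (fun hh => by subst hh; exact absurd hb (by decide))
  have e6 : (c = 'g') = False := eq_false (fun hh => by subst hh; exact absurd hb (by decide))
  have e7 : (c = 'h') = False := eq_false (fun hh => by subst hh; exact absurd hb (by decide))
  have e8 : (c = 'i') = False := eq_false (fun hh => by subst hh; exact absurd hb (by decide))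
  have e9 : (c = 'j') = False := eq_false (fun hh => by subst hh; exact absurd hb (by decide))
  have e10 : (c = 'k') = False := eq_false (fun hh => by subst hh; exact absurd hb (by decide))
  have e11 : (c = 'l') = False := eq_false (fun hh => by subst hh; exact absurd hb (by decide))
  have e12 : (c = 'm') = False := eq_false (fun hh => by subst hh; exact absurd hb (by decide))
  have e13 : (c = 'n') = False := eq_false (fun hh => by subst hh; exact absurd hb (by decide))
  have e14 : (c = 'o') = False := eq_false (fun hh => by subst hh; exact absurd hb (by decide))
  have e15 : (c = 'p') = False := eq_false (fun hh => by subst hh; exact absurd hb (by decide))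
  have e16 : (c = 'q') = False := eq_false (fun hh => by subst hh; exact absurd hb (by decide))
  have e17 : (c = 'r') = False := eq_false (fun hh => by subst hh; exact absurd hb (by decide))
  have e18 : (c = 's') = False := eq_false (fun hh => by subst hh; exact absurd hb (by decide))
  have e19 : (c = 't') = False := eq_false (fun hh => by subst hh; exact absurd hb (by decide))
  have e20 : (c = 'u') = False := eq_false (fun hh => by subst hh; exact absurd hb (by decide))
  have e21 : (c = 'v') = False := eq_false (fun hh => by subst hh; exact absurd hb (by decide))
  have e22 : (c = 'w') = False := eq_false (fun hh => by subst hh; exact absurd hb (by decide))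
  have e23 : (c = 'x') = False := eq_false (fun hh => by subst hh; exact absurd hb (by decide))
  have e24 : (c = 'y') = False := eq_false (fun hh => by subst hh; exact absurd hb (by decide))
  have e25 : (c = 'z') = False := eq_false (fun hh => by subst hh; exact absurd hb (by decide))
  simp only [List.foldl_cons, List.foldl_nil, hl, g0, g1, g2, g3, g4, g5, g6, g7, g8, g9, g10, g11, g12, g13, g14, g15, g16, g17, g18, g19, g20, g21, g22, g23, g24, g25, Option.some.injEq, e0, e1, e2, e3, e4, e5, e6, e7, e8, e9, e10, e11, e12, e13, e14, e15, e16, e17, e18, e19, e20, e21, e22, e23, e24, e25, if_false]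

theorem pyRotL_rotate (key : Int) (n : Nat) :
    pyRotL (alfL.rotate n) key = alfL.rotate (n + mkeyN key) := by
  unfold pyRotL
  have hlen : (alfL.rotate n).length = 26 := by rw [List.length_rotate]; decide
  rw [hlen]
  rw [if_neg (by decide)]
  rw [PySem.Int.mod_eq_emod_of_pos (by norm_num)]
  have hm : (key % 26).toNat ≤ 26 := by
    have := Int.emod_lt_of_pos key (show (0:Int) < 26 by norm_num)
    omega
  rw [← List.rotate_eq_drop_append_take (by rw [hlen]; exact hm)]
  rw [List.rotate_rotate]
  rfl

theorem getD_rotate (t i : Nat) (hi : i < 26) :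
    PySem.List.pyGetD (alfL.rotate t) ((i : Nat) : Int) 'a' = Char.ofNat (97 + (i + t) % 26) := by
  rw [PySem.List.pyGetD_natCast]
  have hlen : (alfL.rotate t).length = 26 := by rw [List.length_rotate]; decide
  rw [List.getD_eq_getElem _ _ (by omega)]
  rw [List.getElem_rotate]
  rw [← List.getD_eq_getElem alfL 'a']
  have h26 : alfL.length = 26 := by decide
  rw [h26]
  have hb : ∀ j, j < 26 → alfL.getD j 'a' = Char.ofNat (97+j) := by decide
  exact hb _ (Nat.mod_lt _ (by norm_num))

theorem bchar_eq (key : Int) (c : Char) (h1 : 97 ≤ c.toNat) (r : Nat) :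
    Char.ofNat (97 + (PySem.Int.mod ((c.toNat : Int) - 97 + key * ((r : Int) + 1)) 26)).toNat
      = sChar key c (r+1) := by
  rw [PySem.Int.mod_eq_emod_of_pos (by norm_num)]
  unfold sChar mkeyN
  congr 1
  have hnn : (0:Int) ≤ key % 26 := Int.emod_nonneg key (by norm_num)
  have hk : (key * ((r:Int)+1)) % 26 = (((key % 26).toNat : Int) * ((r:Int)+1)) % 26 := by
    rw [Int.toNat_of_nonneg hnn]
    conv_lhs => rw [Int.mul_emod]
    conv_rhs => rw [Int.mul_emod]
    rw [Int.emod_emod_of_dvd key dvd_rfl]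
  have hsplit : ((c.toNat:Int) - 97 + key * ((r:Int)+1)) % 26
      = ((c.toNat:Int) - 97 + ((key % 26).toNat : Int) * ((r:Int)+1)) % 26 := by
    rw [Int.add_emod, hk, ← Int.add_emod]
  rw [hsplit]
  have h2 : ((c.toNat:Int) - 97 + ((key % 26).toNat : Int) * ((r:Int)+1))
      = (((c.toNat - 97) + (key % 26).toNat * (r+1) : Nat) : Int) := by push_cast; omega
  rw [h2]
  omega

theorem low_iff (c : Char) : ('a' ≤ c ∧ c ≤ 'z') ↔ (97 ≤ c.toNat ∧ c.toNat ≤ 122) := by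
  constructor
  · rintro ⟨h1, h2⟩
    exact ⟨by exact_mod_cast UInt32.le_iff_toNat_le.mp h1, by exact_mod_cast UInt32.le_iff_toNat_le.mp h2⟩
  · rintro ⟨h1, h2⟩
    exact ⟨UInt32.le_iff_toNat_le.mpr (by exact_mod_cast h1), UInt32.le_iff_toNat_le.mpr (by exact_mod_cast h2)⟩

theorem A_inv (key : Int) (cs : List Char) : ∀ (suffix pre outA : List Char) (r : Nat),
    cs = pre ++ suffix →
    (fun st => aOuter cs alfL key st)^[suffix.length]
        (alfL.rotate (mkeyN key * r), (pre.length : Int) - 1, outA)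
      = (alfL.rotate (mkeyN key * (r + cntLow suffix)),
          (pre.length : Int) + suffix.length - 1, outA ++ bOutL key suffix r) := by
  intro suffix
  induction suffix with
  | nil =>
    intro pre outA r hcs
    simp only [List.length_nil, Function.iterate_zero_apply, cntLow, bOutL, List.append_nil,
      Nat.cast_zero, add_zero]
  | cons c rest ih =>
    intro pre outA r hcs
    rw [List.length_cons, Function.iterate_succ_apply]
    have hl2 : PySem.List.pyGet? cs (pre.length : Int) = some c := by
      rw [hcs]; exact PySem.List.pyGet?_append_length pre rest c
    have hidx : ((pre.length : Int) - 1) + 1 = (pre.length : Int) := by omega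
    have hcs' : cs = (pre ++ [c]) ++ rest := by rw [hcs]; simp
    have h1 : (((pre ++ [c]).length : Nat) : Int) - 1 = (pre.length : Int) := by simp
    by_cases hlow : 97 ≤ c.toNat ∧ c.toNat ≤ 122
    · have hone : aOuter cs alfL key (alfL.rotate (mkeyN key * r), (pre.length : Int) - 1, outA)
          = (alfL.rotate (mkeyN key * (r + 1)), (pre.length : Int), outA ++ [sChar key c (r + 1)]) := by
        show ((aInner cs alfL key (((pre.length : Int) - 1) + 1) (alfL.rotate (mkeyN key * r), outA)).1,
            ((pre.length : Int) - 1) + 1,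
            (aInner cs alfL key (((pre.length : Int) - 1) + 1) (alfL.rotate (mkeyN key * r), outA)).2) = _
        rw [hidx, inner_low cs key _ c hl2 hlow, pyRotL_rotate]
        rw [show (c.toNat : Int) - 97 = ((c.toNat - 97 : Nat) : Int) from by
          have := hlow.1; omega]
        rw [getD_rotate (mkeyN key * r + mkeyN key) (c.toNat - 97) (by omega)]
        rw [show mkeyN key * r + mkeyN key = mkeyN key * (r + 1) from by rw [Nat.mul_succ]]
        rfl
      rw [hone]
      have hstep := ih (pre ++ [c]) (outA ++ [sChar key c (r + 1)]) (r + 1) hcs'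
      rw [h1] at hstep
      rw [hstep]
      rw [Prod.mk.injEq, Prod.mk.injEq]
      refine ⟨by simp only [cntLow, if_pos hlow]; congr 1; ring,
        by simp only [List.length_append, List.length_cons, List.length_nil]; omega,
        by simp [bOutL, if_pos hlow, List.append_assoc]⟩
    · have hone : aOuter cs alfL key (alfL.rotate (mkeyN key * r), (pre.length : Int) - 1, outA)
          = (alfL.rotate (mkeyN key * r), (pre.length : Int), outA) := by
        show ((aInner cs alfL key (((pre.length : Int) - 1) + 1) (alfL.rotate (mkeyN key * r), outA)).1,
            ((pre.length : Int) - 1) + 1,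
            (aInner cs alfL key (((pre.length : Int) - 1) + 1) (alfL.rotate (mkeyN key * r), outA)).2) = _
        rw [hidx, inner_high cs key _ c hl2 hlow]
      rw [hone]
      have hstep := ih (pre ++ [c]) outA r hcs'
      rw [h1] at hstep
      rw [hstep]
      rw [Prod.mk.injEq, Prod.mk.injEq]
      refine ⟨by simp only [cntLow, if_neg hlow]; congr 1; ring,
        by simp only [List.length_append, List.length_cons, List.length_nil]; omega,
        by simp [bOutL, if_neg hlow]⟩

theorem B_inv (key : Int) : ∀ (cs out : List Char) (r : Nat),
    cs.foldl (bStep key) (out, (r : Int)) = (out ++ bOutL key cs r, ((r + cntLow cs : Nat) : Int)) := by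
  intro cs
  induction cs with
  | nil => intro out r; simp [bOutL, cntLow]
  | cons c cs ih =>
    intro out r
    rw [List.foldl_cons]
    by_cases hlow : 97 ≤ c.toNat ∧ c.toNat ≤ 122
    · rw [show bStep key (out, (r : Int)) c
          = (out ++ [Char.ofNat (97 + (PySem.Int.mod ((c.toNat : Int) - 97 + key * ((r : Int) + 1)) 26)).toNat], (r : Int) + 1) from by
        unfold bStep; rw [if_pos ((low_iff c).mpr hlow)]]
      rw [bchar_eq key c hlow.1 r]
      rw [show ((r : Int) + 1) = (((r + 1 : Nat)) : Int) from by push_cast; ring]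
      rw [ih]
      rw [Prod.mk.injEq]
      refine ⟨by simp [bOutL, if_pos hlow, List.append_assoc], by simp only [cntLow, if_pos hlow]; omega⟩
    · rw [show bStep key (out, (r : Int)) c = (out, (r : Int)) from by
        unfold bStep; rw [if_neg (fun hx => hlow ((low_iff c).mp hx))]]
      rw [ih]
      rw [Prod.mk.injEq]
      refine ⟨by simp [bOutL, if_neg hlow], by simp only [cntLow, if_neg hlow]; omega⟩

-- ===== VERDICT (by name: the statement is the Claim_ definition above) =====
theorem encrypting_spec : Claim_equal_encrypting := by
  intro text key _hdom
  unfold Spec_encrypting encrypting encrypting_alt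
  simp only [aSetup_eq]
  rw [foldl_ignore (fun st => aOuter text.toList alfL key st)]
  rw [show (PySem.List.pyRange 0 (text.toList.length : Int) 1).length = text.toList.length from by
    rw [PySem.List.length_pyRange_one]; omega]
  have hA := A_inv key text.toList text.toList [] [] 0 (by simp)
  simp only [Nat.mul_zero, List.rotate_zero, List.length_nil, Nat.cast_zero, zero_sub,
    List.nil_append, zero_add] at hA
  rw [hA]
  have hB := B_inv key text.toList [] 0
  simp only [Nat.cast_zero, List.nil_append, zero_add] at hB
  rw [hB]
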